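-- pv_equiv track=rewrite | github.com/PINTO0309/onnx2tf | onnx2tf/tflite_builder/pytorch_package_runtime.py | _normalize_axes_list
-- ===== SOURCE A (Python) =====
-- from typing import Any, Callable, Dict, List, Optional, Sequence, Set, Tuple
--
-- def _normalize_dim(dim: int, rank: int) -> int:
--     resolved = int(dim)
--     if resolved < 0:
--         resolved += int(rank)
--     return resolved
--
-- def _normalize_axes_list(value: Sequence[int], rank: int) -> List[int]:
--     normalized: List[int] = []
--     for raw_axis in list(value):
--         axis = _normalize_dim(int(raw_axis), rank)
--         insert_at = 0
--         while insert_at < len(normalized) and int(normalized[insert_at]) < axis: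
--             insert_at += 1
--         if insert_at < len(normalized) and int(normalized[insert_at]) == axis:
--             continue
--         normalized.insert(insert_at, axis)
--     return normalized
-- ===== SOURCE B (Python) =====
-- def _normalize_dim(dim: int, rank: int) -> int:
--     resolved = int(dim)
--     if resolved < 0:
--         resolved += int(rank)
--     return resolved
--
-- def _normalize_axes_list(value, rank):
--     flat = []
--     for raw_axis in list(value):
--         flat.append(_normalize_dim(int(raw_axis), rank))
--     flat = sorted(flat)
--     result = []
--     prev = None
--     for v in flat:
--         if v != prev:
--             result.append(v)
--             prev = v
--     return result
-- ===== Notes on version B (the rewrite author's own statement) =====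
-- stated objective: faster
-- what changed: Replaces A's per-element linear-scan insertion into a kept-sorted list with one sort of all normalized axes followed by a single adjacent-deduplication pass.
import Mathlib
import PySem

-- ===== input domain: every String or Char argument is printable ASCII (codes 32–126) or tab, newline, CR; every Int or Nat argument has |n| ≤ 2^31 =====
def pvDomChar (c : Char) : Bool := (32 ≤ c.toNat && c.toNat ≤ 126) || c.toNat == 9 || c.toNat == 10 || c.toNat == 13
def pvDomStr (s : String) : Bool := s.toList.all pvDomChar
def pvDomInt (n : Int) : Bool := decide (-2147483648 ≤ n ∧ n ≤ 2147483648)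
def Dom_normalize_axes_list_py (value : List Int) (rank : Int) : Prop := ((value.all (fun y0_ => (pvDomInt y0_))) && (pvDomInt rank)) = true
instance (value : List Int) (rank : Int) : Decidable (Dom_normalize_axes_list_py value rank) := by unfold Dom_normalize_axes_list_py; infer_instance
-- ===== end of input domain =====

-- B replaces A's per-element scan-and-insert into a kept-sorted list by one sort plus a single
-- adjacent-dedup pass (objective: faster, O(n log n) vs O(n^2)).

-- ===== PORT A =====
def normalize_dim_py (dim : Int) (rank : Int) : Int :=
  let resolved := dim
  if resolved < 0 then resolved + rank else resolved

-- A's inner while/insert: walk past kept elements < axis; skip if equal; insert otherwise.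
def insertAxisA (axis : Int) : List Int → List Int
  | [] => [axis]
  | y :: ys =>
    if y < axis then y :: insertAxisA axis ys
    else if y = axis then y :: ys
    else axis :: y :: ys

def normalize_axes_list_py (value : List Int) (rank : Int) : List Int :=
  value.foldl (fun normalized raw_axis => insertAxisA (normalize_dim_py raw_axis rank) normalized) []

-- ===== PORT B =====
-- B's dedup loop over the sorted list, carrying `prev` (None at the start).
def dedupGo (prev : Option Int) : List Int → List Int
  | [] => []
  | v :: rest => if some v ≠ prev then v :: dedupGo (some v) rest else dedupGo prev rest

def normalize_axes_list_py_alt (value : List Int) (rank : Int) : List Int :=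
  let flat := value.map (fun raw_axis => normalize_dim_py raw_axis rank)
  dedupGo none (PySem.List.sorted flat (fun x => x) false)

-- ===== PRECONDITION & SPEC =====
def Spec_normalize_axes_list_py (value : List Int) (rank : Int) (out : List Int) : Prop := out = normalize_axes_list_py_alt value rank
instance (value : List Int) (rank : Int) (out : List Int) : Decidable (Spec_normalize_axes_list_py value rank out) := by unfold Spec_normalize_axes_list_py; infer_instance

-- ===== CLAIM (what is proved, stated in full; the proofs are below) =====
def Claim_equal_normalize_axes_list_py : Prop := ∀ (value : List Int) (rank : Int), Dom_normalize_axes_list_py value rank → Spec_normalize_axes_list_py value rank (normalize_axes_list_py value rank)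

-- ===== LEMMAS AND PROOFS =====

theorem mem_insertAxisA (a x : Int) (l : List Int) :
    x ∈ insertAxisA a l ↔ x = a ∨ x ∈ l := by
  induction l with
  | nil => simp [insertAxisA]
  | cons y ys ih =>
    simp only [insertAxisA]
    split_ifs with h1 h2
    · simp only [List.mem_cons, ih]; tauto
    · subst h2; simp
    · simp only [List.mem_cons]

theorem pairwise_insertAxisA (a : Int) (l : List Int)
    (hl : l.Pairwise (· < ·)) : (insertAxisA a l).Pairwise (· < ·) := by
  induction l with
  | nil => simp [insertAxisA]
  | cons y ys ih =>
    rcases List.pairwise_cons.mp hl with ⟨hy, hys⟩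
    simp only [insertAxisA]
    split_ifs with h1 h2
    · refine List.pairwise_cons.mpr ⟨?_, ih hys⟩
      intro x hx
      rcases (mem_insertAxisA a x ys).mp hx with rfl | hx
      · exact h1
      · exact hy x hx
    · exact hl
    · refine List.pairwise_cons.mpr ⟨?_, hl⟩
      intro x hx
      rcases List.mem_cons.mp hx with rfl | hx
      · omega
      · exact lt_trans (by omega) (hy x hx)

theorem foldl_insertA_spec (f : List Int) (acc : List Int)
    (hacc : acc.Pairwise (· < ·)) :
    (f.foldl (fun n a => insertAxisA a n) acc).Pairwise (· < ·) ∧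
    (∀ x, x ∈ f.foldl (fun n a => insertAxisA a n) acc ↔ x ∈ f ∨ x ∈ acc) := by
  induction f generalizing acc with
  | nil => simpa using hacc
  | cons a f ih =>
    have := ih (insertAxisA a acc) (pairwise_insertAxisA a acc hacc)
    refine ⟨this.1, ?_⟩
    intro x
    rw [List.foldl_cons, (this.2 x), mem_insertAxisA]
    simp; tauto

theorem dedupGo_spec (l : List Int) (prev : Option Int)
    (hl : l.Pairwise (· ≤ ·))
    (hprev : ∀ p, prev = some p → ∀ x ∈ l, p ≤ x) :
    (dedupGo prev l).Pairwise (· < ·) ∧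
    (∀ x, x ∈ dedupGo prev l ↔ x ∈ l ∧ some x ≠ prev) := by
  induction l generalizing prev with
  | nil => simp [dedupGo]
  | cons v rest ih =>
    rcases List.pairwise_cons.mp hl with ⟨hv, hrest⟩
    simp only [dedupGo]
    split_ifs with hne
    · -- keep v, continue with prev := some v
      have ih' := ih (some v) hrest (by intro p hp x hx; injection hp with h; subst h; exact hv x hx)
      constructor
      · refine List.pairwise_cons.mpr ⟨?_, ih'.1⟩
        intro x hx
        rcases (ih'.2 x).mp hx with ⟨hxr, hxne⟩
        have := hv x hxr
        have : v ≠ x := fun h => hxne (by simp [h])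
        omega
      · intro x
        rw [List.mem_cons, (ih'.2 x)]
        constructor
        · rintro (rfl | ⟨hxr, hxne⟩)
          · exact ⟨List.mem_cons_self, hne⟩
          · refine ⟨List.mem_cons_of_mem _ hxr, ?_⟩
            intro hxp
            have h1 : x ≤ v := hprev x hxp.symm v List.mem_cons_self
            have h2 : v ≤ x := hv x hxr
            have hvx : v = x := le_antisymm h2 h1
            exact hne (hvx ▸ hxp)
        · rintro ⟨hx, hxne⟩
          rcases List.mem_cons.mp hx with rfl | hxr
          · exact Or.inl rfl
          · by_cases hxv : x = v
            · exact Or.inl hxv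
            · exact Or.inr ⟨hxr, fun h => hxv (Option.some.inj h)⟩
    · -- v = prev, drop it
      simp only [ne_eq, not_not] at hne
      have ih' := ih prev hrest (by
        rintro p hp x hx
        exact hprev p hp x (List.mem_cons_of_mem _ hx))
      refine ⟨ih'.1, ?_⟩
      intro x
      rw [(ih'.2 x), List.mem_cons]
      constructor
      · rintro ⟨hxr, hxne⟩; exact ⟨Or.inr hxr, hxne⟩
      · rintro ⟨rfl | hxr, hxne⟩
        · exact absurd hne hxne
        · exact ⟨hxr, hxne⟩

theorem eq_of_pairwise_lt_of_mem_iff (l1 : List Int) :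
    ∀ (l2 : List Int), l1.Pairwise (· < ·) → l2.Pairwise (· < ·) →
    (∀ x, x ∈ l1 ↔ x ∈ l2) → l1 = l2 := by
  induction l1 with
  | nil =>
    intro l2 _ _ hm
    cases l2 with
    | nil => rfl
    | cons b t2 => exact absurd ((hm b).mpr List.mem_cons_self) (by simp)
  | cons a t1 ih =>
    intro l2 h1 h2 hm
    cases l2 with
    | nil => exact absurd ((hm a).mp List.mem_cons_self) (by simp)
    | cons b t2 =>
      rcases List.pairwise_cons.mp h1 with ⟨ha, ht1⟩
      rcases List.pairwise_cons.mp h2 with ⟨hb, ht2⟩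
      have hab : a = b := by
        rcases List.mem_cons.mp ((hm a).mp List.mem_cons_self) with h | h
        · exact h
        · have hba : b < a := hb a h
          rcases List.mem_cons.mp ((hm b).mpr List.mem_cons_self) with h' | h'
          · omega
          · have := ha b h'; omega
      subst hab
      have htm : ∀ x, x ∈ t1 ↔ x ∈ t2 := by
        intro x
        constructor
        · intro hx
          rcases List.mem_cons.mp ((hm x).mp (List.mem_cons_of_mem _ hx)) with rfl | h
          · exact absurd (ha x hx) (lt_irrefl x)
          · exact h
        · intro hx
          rcases List.mem_cons.mp ((hm x).mpr (List.mem_cons_of_mem _ hx)) with rfl | h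
          · exact absurd (hb x hx) (lt_irrefl x)
          · exact h
      rw [ih t2 ht1 ht2 htm]

-- ===== VERDICT (by name: the statement is the Claim_ definition above) =====
theorem normalize_axes_list_py_spec : Claim_equal_normalize_axes_list_py := by
  intro value rank _
  unfold Spec_normalize_axes_list_py normalize_axes_list_py normalize_axes_list_py_alt
  set f := value.map (fun raw_axis => normalize_dim_py raw_axis rank) with hf
  have hA : value.foldl (fun normalized raw_axis =>
      insertAxisA (normalize_dim_py raw_axis rank) normalized) []
      = f.foldl (fun n a => insertAxisA a n) [] := by
    rw [hf, List.foldl_map]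
  rw [hA]
  have hAspec := foldl_insertA_spec f [] (by simp)
  have hsortedle : (PySem.List.sorted f (fun x => x) false).Pairwise (· ≤ ·) := by
    have := PySem.List.sorted_pairwise (xs := f) (key := fun x => x)
    simpa using this
  have hBspec := dedupGo_spec (PySem.List.sorted f (fun x => x) false) none hsortedle
    (by rintro p hp; cases hp)
  apply eq_of_pairwise_lt_of_mem_iff _ _ hAspec.1 hBspec.1
  intro x
  rw [(hAspec.2 x), (hBspec.2 x), PySem.List.mem_sorted]
  simp
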